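-- pv_equiv track=rewrite | github.com/Estebyte/python | Projectos/How many days have you lived/Chat Gpt Correction/utils.py | get_month_list
-- ===== SOURCE A (Python) =====
-- def days_in_month(month, year):
--     """Return the number of days in a given month of a specific year."""
--     if month in (1, 3, 5, 7, 8, 10, 12):
--         return 31
--     elif month in (4, 6, 9, 11):
--         return 30
--     elif month == 2:
--         # Check for leap year
--         if (year % 4 == 0 and year % 100 != 0) or (year % 400 == 0):
--             return 29
--         else:
--             return 28
--     return 28
--
-- def get_month_list(year):
--     """Return a list of dictionaries with months and their respective days for a specific year."""
--     months_list = []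
--     for i in range(1, 13):
--         month_dict = {
--             "month": i,
--             "days": days_in_month(i, year)
--         }
--         months_list.append(month_dict)
--
--     return months_list
-- ===== SOURCE B (Python) =====
-- def get_month_list(year):
--     """Return a list of dictionaries with months and their respective days for a specific year."""
--     leap = (year % 4 == 0 and year % 100 != 0) or year % 400 == 0
--     return [{"month": m,
--              "days": 28 + leap if m == 2 else 30 + (m + m // 8) % 2}
--             for m in range(1, 13)]
-- ===== Notes on version B (the rewrite author's own statement) =====
-- stated objective: alternative
-- what changed: Replaces the per-month if/elif membership-chain helper by a closed arithmetic formula: days = 30 + (m + m//8) % 2 for every month except February, which is 28 + leap with the leap flag computed once.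
import Mathlib
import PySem

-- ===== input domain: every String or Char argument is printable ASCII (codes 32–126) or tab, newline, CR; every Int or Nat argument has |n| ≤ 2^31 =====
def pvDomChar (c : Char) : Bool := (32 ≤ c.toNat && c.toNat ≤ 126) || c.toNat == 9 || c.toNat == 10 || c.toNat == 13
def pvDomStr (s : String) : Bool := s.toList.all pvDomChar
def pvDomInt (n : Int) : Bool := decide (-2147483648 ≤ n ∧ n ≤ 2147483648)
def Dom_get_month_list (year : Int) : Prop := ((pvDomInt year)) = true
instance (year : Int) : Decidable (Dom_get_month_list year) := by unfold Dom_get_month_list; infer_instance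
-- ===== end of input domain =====

-- B replaces the per-month if/elif helper by a closed arithmetic formula
-- 30 + (m + m//8) % 2 (February: 28 + leap, leap computed once) (objective: alternative).

-- ===== PORT A =====
-- transliteration of days_in_month (Python % → PySem.Int.mod)
def days_in_month (month : Int) (year : Int) : Int :=
  if month ∈ ([1, 3, 5, 7, 8, 10, 12] : List Int) then 31
  else if month ∈ ([4, 6, 9, 11] : List Int) then 30
  else if month == 2 then
    if (PySem.Int.mod year 4 == 0 && PySem.Int.mod year 100 != 0) || PySem.Int.mod year 400 == 0
    then 29 else 28
  else 28

def get_month_list (year : Int) : List (List (String × Int)) :=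
  (PySem.List.pyRange 1 13 1).foldl
    (fun months_list i =>
      months_list ++ [[("month", i), ("days", days_in_month i year)]])
    []

-- ===== PORT B =====
def get_month_list_alt (year : Int) : List (List (String × Int)) :=
  let leap := (PySem.Int.mod year 4 == 0 && PySem.Int.mod year 100 != 0)
              || PySem.Int.mod year 400 == 0
  (PySem.List.pyRange 1 13 1).map
    (fun m => [("month", m),
               ("days", if m == 2 then 28 + (if leap then (1:Int) else 0)
                        else 30 + PySem.Int.mod (m + PySem.Int.floordiv m 8) 2)])

-- ===== PRECONDITION & SPEC =====
def Spec_get_month_list (year : Int) (out : List (List (String × Int))) : Prop := out = get_month_list_alt year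
instance (year : Int) (out : List (List (String × Int))) : Decidable (Spec_get_month_list year out) := by unfold Spec_get_month_list; infer_instance

-- ===== CLAIM (what is proved, stated in full; the proofs are below) =====
def Claim_equal_get_month_list : Prop := ∀ (year : Int), Dom_get_month_list year → Spec_get_month_list year (get_month_list year)

-- ===== LEMMAS AND PROOFS =====

-- ===== VERDICT (by name: the statement is the Claim_ definition above) =====
theorem get_month_list_spec : Claim_equal_get_month_list := by
  intro year _
  unfold Spec_get_month_list get_month_list get_month_list_alt days_in_month
  simp [PySem.List.pyRange, PySem.Int.mod, PySem.Int.floordiv, List.range_succ]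
  split_ifs <;> norm_num
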